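-- pv_equiv track=rewrite | github.com/Phynnnix/binary-sudoku-solver | main.py | hasSomeError
-- ===== SOURCE A (Python) =====
-- def hasSomeError(line):
--     cOne, cZero = 0, 0
--     for i in range(len(line)):
--         if line[i] == 0:
--             cZero += 1
--         if line[i] == 1:
--             cOne += 1
--         if cOne > len(line) // 2 or cZero > len(line) // 2:
--             return True
--         if (i < len(line) - 2):
--             if line[i] == line[i + 1] and line[i + 1] == line[i + 2]:
--                 return True
--     return False
-- ===== SOURCE B (Python) =====
-- def hasSomeError(line):
--     half = len(line) // 2
--     triple = any(a == b == c for a, b, c in zip(line, line[1:], line[2:]))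
--     return line.count(0) > half or line.count(1) > half or triple
-- ===== Notes on version B (the rewrite author's own statement) =====
-- stated objective: simpler
-- what changed: Replaces the single interleaved index loop with early returns by two separate declarative passes: whole-list count(0)/count(1) compared against len//2, plus a zip-with-offsets scan for three consecutive equal elements, combined with or.
import Mathlib
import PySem

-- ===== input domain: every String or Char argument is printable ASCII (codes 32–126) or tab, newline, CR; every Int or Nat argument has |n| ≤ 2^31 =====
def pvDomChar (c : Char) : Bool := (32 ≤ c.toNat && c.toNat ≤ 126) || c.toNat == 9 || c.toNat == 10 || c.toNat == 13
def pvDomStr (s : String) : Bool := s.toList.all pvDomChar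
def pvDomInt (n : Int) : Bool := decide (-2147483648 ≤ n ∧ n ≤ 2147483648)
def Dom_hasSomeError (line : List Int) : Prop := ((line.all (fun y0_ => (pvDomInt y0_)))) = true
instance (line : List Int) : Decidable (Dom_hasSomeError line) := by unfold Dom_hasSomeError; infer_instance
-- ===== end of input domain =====

-- B replaces A's single interleaved loop (running counters with early returns) by two
-- separate declarative passes: whole-list counts of 0/1 compared against len//2, and a
-- zip-with-offsets scan for three consecutive equal elements, combined with `or`.

-- ===== PORT A =====
-- A's for-loop over i with running counters cOne/cZero and early returns, written as the
-- structural recursion over the remaining suffix (line[i] is the head; line[i+1], line[i+2]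
-- are the next two elements; 'i < len(line) - 2' = at least two elements remain).
def hasSomeErrorLoop (half : Int) : List Int → Int → Int → Bool
  | [], _cOne, _cZero => false
  | x :: rest, cOne, cZero =>
    let cZero' := if x == 0 then cZero + 1 else cZero
    let cOne' := if x == 1 then cOne + 1 else cOne
    if cOne' > half || cZero' > half then true
    else
      match rest with
      | y :: z :: _ => if x == y && y == z then true else hasSomeErrorLoop half rest cOne' cZero'
      | _ => hasSomeErrorLoop half rest cOne' cZero'

def hasSomeError (line : List Int) : Bool :=
  hasSomeErrorLoop (PySem.Int.floordiv (line.length : Int) 2) line 0 0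

-- ===== PORT B =====
-- any(a == b == c for a, b, c in zip(line, line[1:], line[2:]))
def tripleScan (line : List Int) : Bool :=
  ((line.zip (line.drop 1)).zip (line.drop 2)).any (fun t => t.1.1 == t.1.2 && t.1.2 == t.2)

def hasSomeError_alt (line : List Int) : Bool :=
  let half := PySem.Int.floordiv (line.length : Int) 2
  decide ((PySem.List.count line 0 : Int) > half) ||
    decide ((PySem.List.count line 1 : Int) > half) || tripleScan line

-- ===== PRECONDITION & SPEC =====
def Spec_hasSomeError (line : List Int) (out : Bool) : Prop := out = hasSomeError_alt line
instance (line : List Int) (out : Bool) : Decidable (Spec_hasSomeError line out) := by unfold Spec_hasSomeError; infer_instance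

-- ===== CLAIM (what is proved, stated in full; the proofs are below) =====
def Claim_equal_hasSomeError : Prop := ∀ (line : List Int), Dom_hasSomeError line → Spec_hasSomeError line (hasSomeError line)

-- ===== LEMMAS AND PROOFS =====

theorem loop_cons3 (half x y z : Int) (r : List Int) (c1 c0 : Int) :
    hasSomeErrorLoop half (x :: y :: z :: r) c1 c0 =
      (if (if x == 1 then c1 + 1 else c1) > half ∨ (if x == 0 then c0 + 1 else c0) > half then true
       else if x == y && y == z then true
       else hasSomeErrorLoop half (y :: z :: r) (if x == 1 then c1 + 1 else c1)
         (if x == 0 then c0 + 1 else c0)) := by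
  simp [hasSomeErrorLoop]

theorem tripleScan_cons3 (x y z : Int) (r : List Int) :
    tripleScan (x :: y :: z :: r) = ((x == y && y == z) || tripleScan (y :: z :: r)) := by
  simp [tripleScan]

theorem loop_char (half : Int) (s : List Int) (c1 c0 : Int)
    (h1 : c1 ≤ half) (h0 : c0 ≤ half) :
    hasSomeErrorLoop half s c1 c0 =
      (decide (c1 + (s.count 1 : Int) > half) || decide (c0 + (s.count 0 : Int) > half) ||
        tripleScan s) := by
  induction s generalizing c1 c0 with
  | nil =>
    simp [hasSomeErrorLoop, tripleScan]; omega
  | cons x rest ih =>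
    rcases rest with _ | ⟨y, rest⟩
    · simp only [hasSomeErrorLoop, tripleScan]
      by_cases hx1 : x = 1 <;> by_cases hx0 : x = 0 <;>
        simp [hx1, hx0, List.count_cons] <;> omega
    · rcases rest with _ | ⟨z, rest⟩
      · simp only [hasSomeErrorLoop, tripleScan]
        by_cases hx1 : x = 1 <;> by_cases hx0 : x = 0 <;>
          by_cases hy1 : y = 1 <;> by_cases hy0 : y = 0 <;>
            simp [hx1, hx0, hy1, hy0] <;> (try split_ifs) <;> (try rw [Bool.eq_iff_iff]) <;> (try simp) <;> omega
      · have hcnt1 : (List.count 1 (x :: y :: z :: rest) : Int) =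
            (if x = 1 then 1 else 0) + (List.count 1 (y :: z :: rest) : Int) := by
          by_cases hx : x = 1 <;> simp [hx, List.count_cons] <;> push_cast <;> (try ring)
        have hcnt0 : (List.count 0 (x :: y :: z :: rest) : Int) =
            (if x = 0 then 1 else 0) + (List.count 0 (y :: z :: rest) : Int) := by
          by_cases hx : x = 0 <;> simp [hx, List.count_cons] <;> push_cast <;> (try ring)
        rw [loop_cons3, tripleScan_cons3]
        simp only [beq_iff_eq]
        by_cases hov : ((if x = 1 then c1 + 1 else c1) > half ∨ (if x = 0 then c0 + 1 else c0) > half)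
        · rw [if_pos hov]
          symm
          simp only [Bool.or_eq_true, decide_eq_true_eq]
          left
          rw [hcnt1, hcnt0]
          rcases hov with h | h
          · left; split at h <;> split <;> omega
          · right; split at h <;> split <;> omega
        · rw [if_neg hov]
          simp only [not_or, not_lt] at hov
          rw [ih _ _ hov.1 hov.2]
          by_cases hxyz : (x = y ∧ y = z)
          · simp [hxyz.1, hxyz.2]
          · rw [if_neg (by simp [hxyz] )]
            rw [Bool.eq_iff_iff]
            simp only [Bool.or_eq_true, decide_eq_true_eq, Bool.and_eq_true, beq_iff_eq]
            rw [hcnt1, hcnt0]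
            by_cases ht : tripleScan (y :: z :: rest) = true <;>
              simp [ht, hxyz] <;> split_ifs <;> omega

-- ===== VERDICT (by name: the statement is the Claim_ definition above) =====
theorem hasSomeError_spec : Claim_equal_hasSomeError := by
  intro line _
  unfold Spec_hasSomeError hasSomeError hasSomeError_alt
  have hhalf : (0:Int) ≤ PySem.Int.floordiv (line.length : Int) 2 := by
    rw [PySem.Int.floordiv_eq_ediv_of_pos (by omega)]
    positivity
  rw [loop_char _ line 0 0 hhalf hhalf]
  simp only [PySem.List.count_eq, zero_add]
  ac_rfl
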